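-- pv_equiv track=rewrite | github.com/ryan25442/Computer_Organization_Project | co_2026_evaluation_framework_release/SimpleAssembler/Assembler.py | two_pass_assembler
-- ===== SOURCE A (Python) =====
-- TYPE_MAP = {
--
--     "add":"R","sub":"R","sll":"R","slt":"R","sltu":"R",
--     "xor":"R","srl":"R","or":"R","and":"R",
--
--     "lw":"I","addi":"I","sltiu":"I","jalr":"I",
--
--     "sw":"S",
--
--     "beq":"B","bne":"B","blt":"B","bge":"B","bltu":"B","bgeu":"B",
--
--     "lui":"U","auipc":"U",
--
--     "jal":"J"
-- }
--
-- def two_pass_assembler(parsed_lines):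
--     table = {}
--     pc = 0
--     inst_only = []
--
--
--     for line in parsed_lines:
--         if len(line) == 1 and line[0].endswith(':'):
--             label_name = line[0][:-1]
--             table[label_name] = pc
--         else:
--             inst_only.append(line)
--             pc += 4
--
--
--     resolved_instructions = []
--     pc = 0
--
--     for inst in inst_only:
--         op = inst[0]
--         inst_type = TYPE_MAP.get(op)
--
--
--         resolved_inst = list(inst)
--
--         if inst_type == "B":
--
--             tgt = resolved_inst[3]
--
--             if tgt.lstrip('-').isdigit() == False:
--                 if tgt in table:
--                     offset = table[tgt] - pc
--                     resolved_inst[3] = str(offset)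
--                 else:
--                     raise Exception(f"error: label '{tgt}' not found.")
--
--         elif inst_type == "J":
--
--
--             tgt = resolved_inst[2]
--             if tgt.lstrip('-').isdigit() == False:
--                 if tgt in table:
--                     offset = table[tgt] - pc
--                     resolved_inst[2] = str(offset)
--                 else:
--                     raise Exception(f"error: label '{tgt}' not found.")
--
--         resolved_instructions.append(resolved_inst)
--         pc += 4
--
--     return resolved_instructions
-- ===== SOURCE B (Python) =====
-- TYPE_MAP = {
--     "add":"R","sub":"R","sll":"R","slt":"R","sltu":"R",
--     "xor":"R","srl":"R","or":"R","and":"R",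
--     "lw":"I","addi":"I","sltiu":"I","jalr":"I",
--     "sw":"S",
--     "beq":"B","bne":"B","blt":"B","bge":"B","bltu":"B","bgeu":"B",
--     "lui":"U","auipc":"U",
--     "jal":"J"
-- }
--
-- def two_pass_assembler(parsed_lines):
--     # Single pass: labels fill the table, instructions are emitted immediately;
--     # unresolved branch/jump targets are recorded as fixups and patched afterwards.
--     table = {}
--     out = []
--     fixups = []  # (output index, field index, pc of that instruction)
--     pc = 0
--     for line in parsed_lines:
--         if len(line) == 1 and line[0].endswith(':'):
--             table[line[0][:-1]] = pc
--             continue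
--         inst = list(line)
--         t = TYPE_MAP.get(inst[0])
--         if t == "B" and not inst[3].lstrip('-').isdigit():
--             fixups.append((len(out), 3, pc))
--         elif t == "J" and not inst[2].lstrip('-').isdigit():
--             fixups.append((len(out), 2, pc))
--         out.append(inst)
--         pc += 4
--     for i, f, at in fixups:
--         tgt = out[i][f]
--         if tgt not in table:
--             raise Exception(f"error: label '{tgt}' not found.")
--         out[i][f] = str(table[tgt] - at)
--     return out
-- ===== Notes on version B (the rewrite author's own statement) =====
-- stated objective: alternative
-- what changed: A's full second resolution pass over all instructions is replaced by a single pass that emits instructions immediately while building the label table, recording (index, field, pc) fixups only for unresolved branch/jump targets, which are patched in one short loop afterwards.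
-- outside the precondition, e.g. on two_pass_assembler([['beq', 'x1', 'x2', 'missing']]): A raises Exception, B raises Exception; on two_pass_assembler([['beq', 'x1']]): A raises IndexError, B raises IndexError
import Mathlib
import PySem

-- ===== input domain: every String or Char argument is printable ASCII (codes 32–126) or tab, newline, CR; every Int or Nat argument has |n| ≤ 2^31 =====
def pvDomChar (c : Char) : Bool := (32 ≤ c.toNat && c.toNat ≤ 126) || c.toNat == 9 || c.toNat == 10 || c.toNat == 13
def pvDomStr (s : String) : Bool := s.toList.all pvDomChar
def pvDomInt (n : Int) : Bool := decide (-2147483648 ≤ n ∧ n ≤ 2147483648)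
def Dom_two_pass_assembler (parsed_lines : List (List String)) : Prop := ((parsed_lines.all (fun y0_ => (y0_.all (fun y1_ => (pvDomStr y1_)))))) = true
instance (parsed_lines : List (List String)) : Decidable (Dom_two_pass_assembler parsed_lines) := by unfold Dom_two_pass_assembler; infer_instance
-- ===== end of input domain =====

-- B replaces A's full second pass with a single pass that emits instructions immediately and
-- a fixup list patched afterwards (objective: alternative decomposition, same cost).

-- ===== PORT A =====

-- TYPE_MAP (module constant, shared by both Pythons)
def pvTypeMap : PySem.Dict String String := PySem.Dict.ofList
  [("add","R"),("sub","R"),("sll","R"),("slt","R"),("sltu","R"),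
   ("xor","R"),("srl","R"),("or","R"),("and","R"),
   ("lw","I"),("addi","I"),("sltiu","I"),("jalr","I"),
   ("sw","S"),
   ("beq","B"),("bne","B"),("blt","B"),("bge","B"),("bltu","B"),("bgeu","B"),
   ("lui","U"),("auipc","U"),
   ("jal","J")]

-- len(line) == 1 and line[0].endswith(':')  (identical in both Pythons; headI is read only when the length is 1)
def pvIsLabel (l : List String) : Bool := l.length == 1 && PySem.Str.endswith l.headI ":"

-- line[0][:-1]
def pvLabelName (s : String) : String := PySem.Str.slice s none (some (-1))

-- hand port of tgt.lstrip('-').isdigit(): lstrip('-') drops exactly the leading '-' characters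
-- (exact: '-' is a single ASCII char, so the strip set is {'-'}); isdigit via PySem.Chars.strIsdigit
def pvNumericTgt (s : String) : Bool := PySem.Chars.strIsdigit (s.toList.dropWhile (· == '-'))

-- A's first loop: build the label table and the instruction-only list
def pvPass1 (tbl : PySem.Dict String Int) (pc : Int) (acc : List (List String)) :
    List (List String) → PySem.Dict String Int × Int × List (List String)
  | [] => (tbl, pc, acc)
  | l :: rest =>
    if pvIsLabel l then pvPass1 (tbl.insert (pvLabelName l.headI) pc) pc acc rest
    else pvPass1 tbl (pc + 4) (acc ++ [l]) rest

-- the body of A's second loop; none = the raise (IndexError on inst[0]/inst[3]/inst[2], or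
-- the explicit Exception when the label is missing).  The assignment resolved_inst[3] = … is
-- List.set: the index was just read successfully by pyGet?, so it is in range (exact).
def pvResolve (tbl : PySem.Dict String Int) (pc : Int) (inst : List String) : Option (List String) :=
  match PySem.List.pyGet? inst 0 with
  | none => none
  | some op =>
    let ty := pvTypeMap.get? op
    if ty = some "B" then
      match PySem.List.pyGet? inst 3 with
      | none => none
      | some tgt =>
        if pvNumericTgt tgt = false then
          match tbl.get? tgt with
          | some v => some (inst.set 3 (PySem.Int.toStr (v - pc)))
          | none => none
        else some inst
    else if ty = some "J" then
      match PySem.List.pyGet? inst 2 with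
      | none => none
      | some tgt =>
        if pvNumericTgt tgt = false then
          match tbl.get? tgt with
          | some v => some (inst.set 2 (PySem.Int.toStr (v - pc)))
          | none => none
        else some inst
    else some inst

-- A's second loop
def pvPass2 (tbl : PySem.Dict String Int) (pc : Int) :
    List (List String) → Option (List (List String))
  | [] => some []
  | i :: r =>
    match pvResolve tbl pc i with
    | none => none
    | some x => (pvPass2 tbl (pc + 4) r).map (x :: ·)

def two_pass_assembler (parsed_lines : List (List String)) : List (List String) :=
  let s := pvPass1 PySem.Dict.empty 0 [] parsed_lines
  (pvPass2 s.1 0 s.2.2).getD []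

-- ===== PORT B =====

-- B's in-loop fixup decision: none = raise (IndexError); some none = no fixup; some (some f) = fixup at field f
def pvFixStep (inst : List String) : Option (Option Nat) :=
  match PySem.List.pyGet? inst 0 with
  | none => none
  | some op =>
    let t := pvTypeMap.get? op
    if t = some "B" then
      match PySem.List.pyGet? inst 3 with
      | none => none
      | some tgt => if pvNumericTgt tgt = false then some (some 3) else some none
    else if t = some "J" then
      match PySem.List.pyGet? inst 2 with
      | none => none
      | some tgt => if pvNumericTgt tgt = false then some (some 2) else some none
    else some none

-- B's single pass: table, emitted instructions, fixup list (out index, field index, pc)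
def pvPassB (tbl : PySem.Dict String Int) (pc : Int) (out : List (List String))
    (fx : List (Nat × Nat × Int)) :
    List (List String) → Option (PySem.Dict String Int × List (List String) × List (Nat × Nat × Int))
  | [] => some (tbl, out, fx)
  | l :: rest =>
    if pvIsLabel l then pvPassB (tbl.insert (pvLabelName l.headI) pc) pc out fx rest
    else
      match pvFixStep l with
      | none => none
      | some o =>
        let ent : List (Nat × Nat × Int) := match o with | some f => [(out.length, f, pc)] | none => []
        pvPassB tbl (pc + 4) (out ++ [l]) (fx ++ ent) rest

-- B's fixup loop; out[i] / out[i][f] are nonnegative in-range Python indexings, so [·]? is exact;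
-- none = the raise (Exception when the label is missing)
def pvApplyFix (tbl : PySem.Dict String Int) (out : List (List String)) :
    List (Nat × Nat × Int) → Option (List (List String))
  | [] => some out
  | (i, f, at_) :: rest =>
    match out[i]? with
    | none => none
    | some row =>
      match row[f]? with
      | none => none
      | some tgt =>
        match tbl.get? tgt with
        | none => none
        | some v => pvApplyFix tbl (out.set i (row.set f (PySem.Int.toStr (v - at_)))) rest

def two_pass_assembler_alt (parsed_lines : List (List String)) : List (List String) :=
  match pvPassB PySem.Dict.empty 0 [] [] parsed_lines with
  | none => []
  | some (tbl, out, fx) => (pvApplyFix tbl out fx).getD []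

-- ===== PRECONDITION & SPEC =====

-- the label names defined anywhere in the input (the keys of the table)
def pvLabels (p : List (List String)) : List String :=
  (p.filter (fun l => pvIsLabel l)).map (fun l => pvLabelName l.headI)

-- Exactly the inputs on which Python A returns normally: every non-label line is nonempty, and a
-- B/J-type instruction has its target field present and either numeric or a defined label
-- (otherwise A raises IndexError resp. the explicit Exception).
def Pre_two_pass_assembler (parsed_lines : List (List String)) : Prop :=
  ∀ l ∈ parsed_lines, pvIsLabel l = false →
    l ≠ [] ∧
    (pvTypeMap.get? l.headI = some "B" →
      4 ≤ l.length ∧ (pvNumericTgt (l.getD 3 "") = true ∨ l.getD 3 "" ∈ pvLabels parsed_lines)) ∧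
    (pvTypeMap.get? l.headI = some "J" →
      3 ≤ l.length ∧ (pvNumericTgt (l.getD 2 "") = true ∨ l.getD 2 "" ∈ pvLabels parsed_lines))

instance (parsed_lines : List (List String)) : Decidable (Pre_two_pass_assembler parsed_lines) := by
  unfold Pre_two_pass_assembler; infer_instance

def pvWitness_two_pass_assembler : List (List String) :=
  [["loop:"], ["beq", "x1", "x2", "loop"], ["jal", "x1", "end"], ["add", "a", "b", "c"], ["end:"]]

def Spec_two_pass_assembler (parsed_lines : List (List String)) (out : List (List String)) : Prop :=
  out = two_pass_assembler_alt parsed_lines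
instance (parsed_lines : List (List String)) (out : List (List String)) :
    Decidable (Spec_two_pass_assembler parsed_lines out) := by
  unfold Spec_two_pass_assembler; infer_instance

-- ===== CLAIM (what is proved, stated in full; the proofs are below) =====
def Claim_equal_two_pass_assembler : Prop :=
  ∀ (parsed_lines : List (List String)), Dom_two_pass_assembler parsed_lines →
    Pre_two_pass_assembler parsed_lines →
    Spec_two_pass_assembler parsed_lines (two_pass_assembler parsed_lines)

-- ===== LEMMAS AND PROOFS =====

-- specification of B's fixup list for an instruction-only suffix starting at out-index i and pc
def pvFxB (i : Nat) (pc : Int) : List (List String) → Option (List (Nat × Nat × Int))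
  | [] => some []
  | inst :: r =>
    match pvFixStep inst with
    | none => none
    | some o =>
      (pvFxB (i + 1) (pc + 4) r).map
        (fun l => (match o with | some f => [(i, f, pc)] | none => []) ++ l)

def pvShiftE (e : Nat × Nat × Int) : Nat × Nat × Int := (e.1 + 1, e.2)

lemma pvResolve_of_fixStep_none (tbl : PySem.Dict String Int) (pc : Int) (inst : List String)
    (h : pvFixStep inst = none) : pvResolve tbl pc inst = none := by
  unfold pvFixStep at h
  unfold pvResolve
  cases hop : PySem.List.pyGet? inst 0 with
  | none => rfl
  | some op =>
    simp only [hop] at h ⊢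
    split_ifs at h ⊢ with h1 h2
    · cases hg : PySem.List.pyGet? inst 3 with
      | none => rfl
      | some tgt => simp only [hg] at h; split_ifs at h
    · cases hg : PySem.List.pyGet? inst 2 with
      | none => rfl
      | some tgt => simp only [hg] at h; split_ifs at h

lemma pvResolve_of_fixStep_skip (tbl : PySem.Dict String Int) (pc : Int) (inst : List String)
    (h : pvFixStep inst = some none) : pvResolve tbl pc inst = some inst := by
  unfold pvFixStep at h
  unfold pvResolve
  cases hop : PySem.List.pyGet? inst 0 with
  | none => simp [hop] at h
  | some op =>
    simp only [hop] at h ⊢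
    split_ifs at h ⊢ with h1 h2
    · cases hg : PySem.List.pyGet? inst 3 with
      | none => simp [hg] at h
      | some tgt =>
        simp only [hg] at h ⊢
        split_ifs at h ⊢ with hd
        · simp at h
        · rfl
    · cases hg : PySem.List.pyGet? inst 2 with
      | none => simp [hg] at h
      | some tgt =>
        simp only [hg] at h ⊢
        split_ifs at h ⊢ with hd
        · simp at h
        · rfl
    · rfl

lemma pvGet3 (xs : List String) : PySem.List.pyGet? xs (3 : Int) = xs[3]? := by
  exact_mod_cast PySem.List.pyGet?_natCast xs 3

lemma pvGet2 (xs : List String) : PySem.List.pyGet? xs (2 : Int) = xs[2]? := by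
  exact_mod_cast PySem.List.pyGet?_natCast xs 2

lemma pvResolve_of_fixStep_fix (tbl : PySem.Dict String Int) (pc : Int) (inst : List String)
    (f : Nat) (h : pvFixStep inst = some (some f)) :
    ∃ tgt, inst[f]? = some tgt ∧
      pvResolve tbl pc inst =
        (tbl.get? tgt).map (fun v => inst.set f (PySem.Int.toStr (v - pc))) := by
  unfold pvFixStep at h
  unfold pvResolve
  cases hop : PySem.List.pyGet? inst 0 with
  | none => simp [hop] at h
  | some op =>
    simp only [hop] at h ⊢
    split_ifs at h ⊢ with h1 h2
    · cases hg : PySem.List.pyGet? inst 3 with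
      | none => simp [hg] at h
      | some tgt =>
        simp only [hg] at h ⊢
        split_ifs at h ⊢ with hd
        · simp only [Option.some.injEq] at h
          subst h
          refine ⟨tgt, ?_, ?_⟩
          · rw [← pvGet3]; exact hg
          · cases tbl.get? tgt <;> rfl
        · simp at h
    · cases hg : PySem.List.pyGet? inst 2 with
      | none => simp [hg] at h
      | some tgt =>
        simp only [hg] at h ⊢
        split_ifs at h ⊢ with hd
        · simp only [Option.some.injEq] at h
          subst h
          refine ⟨tgt, ?_, ?_⟩
          · rw [← pvGet2]; exact hg
          · cases tbl.get? tgt <;> rfl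
        · simp at h
    · simp at h

lemma pvFxB_succ (p : List (List String)) : ∀ (i : Nat) (pc : Int),
    pvFxB (i + 1) pc p = (pvFxB i pc p).map (List.map pvShiftE) := by
  induction p with
  | nil => intro i pc; rfl
  | cons inst r ih =>
    intro i pc
    unfold pvFxB
    cases h : pvFixStep inst with
    | none => rfl
    | some o =>
      rw [ih (i + 1) (pc + 4)]
      cases hf : pvFxB (i + 1) (pc + 4) r with
      | none => rfl
      | some l => cases o <;> simp [pvShiftE]

lemma pvApplyFix_cons (tbl : PySem.Dict String Int) (nf : List (Nat × Nat × Int)) :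
    ∀ (x : List String) (out : List (List String)),
    pvApplyFix tbl (x :: out) (nf.map pvShiftE) = (pvApplyFix tbl out nf).map (x :: ·) := by
  induction nf with
  | nil => intro x out; rfl
  | cons e rest ih =>
    intro x out
    obtain ⟨i, f, a⟩ := e
    show pvApplyFix tbl (x :: out) ((i + 1, f, a) :: rest.map pvShiftE) = _
    simp only [pvApplyFix, List.getElem?_cons_succ, List.set_cons_succ]
    obtain hrow | ⟨row, hrow⟩ := (out[i]?).eq_none_or_eq_some
    · rw [hrow]; rfl
    · rw [hrow]
      dsimp only
      obtain htgt | ⟨tgt, htgt⟩ := (row[f]?).eq_none_or_eq_some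
      · rw [htgt]; rfl
      · rw [htgt]
        dsimp only
        obtain hv | ⟨v, hv⟩ := (tbl.get? tgt).eq_none_or_eq_some
        · rw [hv]; rfl
        · rw [hv]
          dsimp only
          exact ih x (out.set i (row.set f (PySem.Int.toStr (v - a))))

lemma pvFxB_applyFix (tbl : PySem.Dict String Int) (p : List (List String)) : ∀ (pc : Int),
    (pvFxB 0 pc p).bind (pvApplyFix tbl p) = pvPass2 tbl pc p := by
  induction p with
  | nil => intro pc; rfl
  | cons inst rest ih =>
    intro pc
    unfold pvFxB pvPass2
    cases h : pvFixStep inst with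
    | none => rw [pvResolve_of_fixStep_none tbl pc inst h]; rfl
    | some o =>
      rw [pvFxB_succ rest 0 (pc + 4)]
      have hih := ih (pc + 4)
      obtain hf | ⟨nf, hf⟩ := (pvFxB 0 (pc + 4) rest).eq_none_or_eq_some <;> rw [hf] at hih ⊢
      · -- inner fixups raise: both sides none past the head resolution
        simp only [Option.map_none, Option.bind_none] at hih ⊢
        cases o with
        | none => rw [pvResolve_of_fixStep_skip tbl pc inst h, ← hih]; rfl
        | some f =>
          obtain ⟨tgt, htgt, hres⟩ := pvResolve_of_fixStep_fix tbl pc inst f h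
          rw [hres, ← hih]
          cases tbl.get? tgt <;> rfl
      · simp only [Option.map_some, Option.bind_some] at hih ⊢
        cases o with
        | none =>
          rw [pvResolve_of_fixStep_skip tbl pc inst h]
          simp only [List.nil_append]
          rw [pvApplyFix_cons tbl nf inst rest, hih]
        | some f =>
          obtain ⟨tgt, htgt, hres⟩ := pvResolve_of_fixStep_fix tbl pc inst f h
          rw [hres]
          show pvApplyFix tbl (inst :: rest) ((0, f, pc) :: nf.map pvShiftE) = _
          simp only [pvApplyFix, List.getElem?_cons_zero, List.set_cons_zero]
          rw [htgt]
          simp only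
          obtain hv | ⟨v, hv⟩ := (tbl.get? tgt).eq_none_or_eq_some <;> rw [hv]
          · rfl
          · simp only [Option.map_some]
            rw [pvApplyFix_cons tbl nf (inst.set f (PySem.Int.toStr (v - pc))) rest, hih]

lemma pvPass1_acc (p : List (List String)) : ∀ (tbl : PySem.Dict String Int) (pc : Int)
    (acc : List (List String)),
    pvPass1 tbl pc acc p =
      ((pvPass1 tbl pc [] p).1, (pvPass1 tbl pc [] p).2.1, acc ++ (pvPass1 tbl pc [] p).2.2) := by
  induction p with
  | nil => intro tbl pc acc; simp [pvPass1]
  | cons l rest ih =>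
    intro tbl pc acc
    unfold pvPass1
    by_cases h : pvIsLabel l
    · rw [if_pos h, if_pos h]
      exact ih _ pc acc
    · rw [if_neg h, if_neg h]
      rw [ih tbl (pc + 4) (acc ++ [l]), ih tbl (pc + 4) ([] ++ [l])]
      simp

lemma pvPassB_eq (p : List (List String)) : ∀ (tbl : PySem.Dict String Int) (pc : Int)
    (out : List (List String)) (fx : List (Nat × Nat × Int)),
    pvPassB tbl pc out fx p =
      (pvFxB out.length pc (pvPass1 tbl pc [] p).2.2).map
        (fun nf => ((pvPass1 tbl pc [] p).1, out ++ (pvPass1 tbl pc [] p).2.2, fx ++ nf)) := by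
  induction p with
  | nil => intro tbl pc out fx; simp [pvPassB, pvPass1, pvFxB]
  | cons l rest ih =>
    intro tbl pc out fx
    unfold pvPassB pvPass1
    by_cases h : pvIsLabel l
    · rw [if_pos h, if_pos h]
      exact ih _ pc out fx
    · rw [if_neg h, if_neg h]
      rw [pvPass1_acc rest tbl (pc + 4) ([] ++ [l])]
      dsimp only
      simp only [List.nil_append]
      cases hs : pvFixStep l with
      | none => simp [pvFxB, hs]
      | some o =>
        cases o with
        | none =>
          show pvPassB tbl (pc + 4) (out ++ [l]) (fx ++ []) rest = _
          rw [ih tbl (pc + 4) (out ++ [l]) (fx ++ [])]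
          simp only [List.singleton_append, pvFxB, hs, List.length_append, List.length_cons,
            List.length_nil]
          rw [pvFxB_succ]
          obtain hf | ⟨nf, hf⟩ :=
            (pvFxB out.length (pc + 4) (pvPass1 tbl (pc + 4) [] rest).2.2).eq_none_or_eq_some <;>
              rw [hf]
          · rfl
          · simp
        | some f =>
          show pvPassB tbl (pc + 4) (out ++ [l]) (fx ++ [(out.length, f, pc)]) rest = _
          rw [ih tbl (pc + 4) (out ++ [l]) (fx ++ [(out.length, f, pc)])]
          simp only [List.singleton_append, pvFxB, hs, List.length_append, List.length_cons,
            List.length_nil]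
          rw [pvFxB_succ]
          obtain hf | ⟨nf, hf⟩ :=
            (pvFxB out.length (pc + 4) (pvPass1 tbl (pc + 4) [] rest).2.2).eq_none_or_eq_some <;>
              rw [hf]
          · rfl
          · simp

lemma pv_main (p : List (List String)) : two_pass_assembler p = two_pass_assembler_alt p := by
  unfold two_pass_assembler two_pass_assembler_alt
  rw [pvPassB_eq p PySem.Dict.empty 0 [] []]
  dsimp only
  simp only [List.length_nil, List.nil_append]
  have hd := pvFxB_applyFix (pvPass1 PySem.Dict.empty 0 [] p).1
            (pvPass1 PySem.Dict.empty 0 [] p).2.2 0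
  obtain hf | ⟨nf, hf⟩ :=
      (pvFxB 0 0 (pvPass1 PySem.Dict.empty 0 [] p).2.2).eq_none_or_eq_some <;> rw [hf] at hd ⊢
  · rw [Option.bind_none] at hd
    simp [← hd]
  · rw [Option.bind_some] at hd
    simp [← hd]

-- ===== VERDICT (by name: the statement is the Claim_ definition above) =====
theorem two_pass_assembler_spec : Claim_equal_two_pass_assembler := by
  intro p _ _
  exact pv_main p
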